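-- pv_equiv track=rewrite | github.com/joonaspessi/aoc | 2024/10.py | bfs
-- ===== SOURCE A (Python) =====
-- from collections import defaultdict, deque
--
-- def bfs(grid, y, x):
--     result = 0
--     stack = deque([(y, x)])
--     seen = set()
--
--     while stack:
--         y, x = stack.popleft()
--         if (y, x) in seen:
--             continue
--         seen.add((y, x))
--         if grid[y][x] == 0:
--             result += 1
--         for dy, dx in [(-1, 0), (0, 1), (1, 0), (0, -1)]:
--             yy = y + dy
--             xx = x + dx
--             if (
--                 0 <= yy < len(grid)
--                 and 0 <= xx < len(grid[0])
--                 and grid[yy][xx] == grid[y][x] - 1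
--             ):
--                 stack.append((yy, xx))
--     return result
-- ===== SOURCE B (Python) =====
-- def bfs(grid, y, x):
--     # Level-synchronous search: heights drop by exactly 1 per step, so every cell
--     # can appear in at most one frontier and no global 'seen' set is needed.
--     result = 0
--     frontier = {(y, x)}
--     while frontier:
--         result += sum(1 for (cy, cx) in frontier if grid[cy][cx] == 0)
--         nxt = set()
--         for cy, cx in frontier:
--             for dy, dx in [(-1, 0), (0, 1), (1, 0), (0, -1)]:
--                 yy = cy + dy
--                 xx = cx + dx
--                 if (
--                     0 <= yy < len(grid)
--                     and 0 <= xx < len(grid[0])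
--                     and grid[yy][xx] == grid[cy][cx] - 1
--                 ):
--                     nxt.add((yy, xx))
--         frontier = nxt
--     return result
-- ===== Notes on version B (the rewrite author's own statement) =====
-- stated objective: alternative
-- what changed: A's single worklist BFS with a global seen set is replaced by a level-synchronous frontier iteration that keeps NO visited set at all: because every step goes to a cell of height exactly one less, a cell can occur in at most one frontier, so each round just counts the zeros in the current frontier set and builds the next frontier set from scratch.
-- outside the precondition, e.g. on bfs([[5, 5], [7]], 0, 0): A returns 0, B returns 0
import Mathlib
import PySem

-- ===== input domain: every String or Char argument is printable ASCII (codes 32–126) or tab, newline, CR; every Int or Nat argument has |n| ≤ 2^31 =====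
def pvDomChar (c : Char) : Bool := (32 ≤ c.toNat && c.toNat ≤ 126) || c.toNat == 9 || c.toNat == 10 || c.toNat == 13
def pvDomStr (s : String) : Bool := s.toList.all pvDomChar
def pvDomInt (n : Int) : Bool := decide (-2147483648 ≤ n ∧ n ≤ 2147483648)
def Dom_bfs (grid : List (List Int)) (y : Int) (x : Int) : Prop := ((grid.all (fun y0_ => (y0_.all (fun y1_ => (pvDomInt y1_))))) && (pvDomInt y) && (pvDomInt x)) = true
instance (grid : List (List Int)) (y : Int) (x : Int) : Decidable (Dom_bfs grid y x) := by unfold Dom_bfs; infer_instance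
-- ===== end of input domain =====

-- B replaces A's worklist BFS with a global seen set by a level-synchronous frontier
-- iteration that keeps no visited set: heights drop by exactly 1 per step, so a cell can
-- occur in at most one frontier (same bounds and height-step checks, same count).

-- ===== PORT A =====
-- grid[y][x] as both Pythons read it (negative indices from the end; none = IndexError)
def bfsGet (grid : List (List Int)) (y : Int) (x : Int) : Option Int :=
  (PySem.List.pyGet? grid y).bind (fun row => PySem.List.pyGet? row x)

-- the while loop of A; the fuel argument only makes the recursion total (shown sufficient below)
def bfsLoop (grid : List (List Int)) :
    Nat → List (Int × Int) → PySem.Set (Int × Int) → Int → Int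
  | 0, _, _, result => result
  | _ + 1, [], _, result => result
  | f + 1, c :: rest, seen, result =>
    if PySem.Set.contains seen c then
      bfsLoop grid f rest seen result
    else
      let seen' := PySem.Set.add seen c
      match bfsGet grid c.1 c.2 with
      | none => result   -- Python raises IndexError here; excluded by Pre_bfs
      | some v =>
        let result' := if v == 0 then result + 1 else result
        let nbrs := ([(-1, 0), (0, 1), (1, 0), (0, -1)] : List (Int × Int)).foldl
          (fun acc d =>
            if 0 ≤ c.1 + d.1 ∧ c.1 + d.1 < (grid.length : Int) ∧
               0 ≤ c.2 + d.2 ∧ c.2 + d.2 < ((grid.headD []).length : Int) ∧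
               bfsGet grid (c.1 + d.1) (c.2 + d.2) = some (v - 1)
            then acc ++ [(c.1 + d.1, c.2 + d.2)] else acc) []
        bfsLoop grid f (rest ++ nbrs) seen' result'

def bfs (grid : List (List Int)) (y : Int) (x : Int) : Int :=
  bfsLoop grid (5 * (grid.length * (grid.headD []).length + 1) + 1) [(y, x)] PySem.Set.empty 0

-- ===== PORT B =====
-- the 'nxt' set built by one round of B's while loop
def levelNext (grid : List (List Int)) (F : PySem.Set (Int × Int)) : PySem.Set (Int × Int) :=
  F.foldl (fun N c =>
    match bfsGet grid c.1 c.2 with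
    | none => N   -- Python raises IndexError here; excluded by Pre_bfs
    | some v =>
      ([(-1, 0), (0, 1), (1, 0), (0, -1)] : List (Int × Int)).foldl
        (fun N d =>
          if 0 ≤ c.1 + d.1 ∧ c.1 + d.1 < (grid.length : Int) ∧
             0 ≤ c.2 + d.2 ∧ c.2 + d.2 < ((grid.headD []).length : Int) ∧
             bfsGet grid (c.1 + d.1) (c.2 + d.2) = some (v - 1)
          then PySem.Set.add N (c.1 + d.1, c.2 + d.2) else N) N)
    PySem.Set.empty

-- the while loop of B; the fuel argument only makes the recursion total (shown sufficient below)
def levelLoop (grid : List (List Int)) : Nat → PySem.Set (Int × Int) → Int → Int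
  | 0, _, result => result
  | _ + 1, [], result => result
  | f + 1, c :: F', result =>
    levelLoop grid f (levelNext grid (c :: F'))
      ((c :: F').foldl
        (fun acc z => if bfsGet grid z.1 z.2 == some 0 then acc + 1 else acc) result)

def bfs_alt (grid : List (List Int)) (y : Int) (x : Int) : Int :=
  levelLoop grid (grid.length * (grid.headD []).length + 2)
    (PySem.Set.ofList [(y, x)]) 0

-- ===== PRECONDITION & SPEC =====
-- Pre_ excludes exactly the inputs where an indexing step can raise IndexError: an out-of-range
-- start cell, and ragged grids with some row shorter than row 0 (A raises on such a row whenever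
-- the search reaches it; reachability is not closed-form, so all such ragged grids are excluded,
-- including some on which A happens to return — see the cites).
def Pre_bfs (grid : List (List Int)) (y : Int) (x : Int) : Prop :=
  bfsGet grid y x ≠ none ∧ ∀ row ∈ grid, (grid.headD []).length ≤ row.length
instance (grid : List (List Int)) (y : Int) (x : Int) : Decidable (Pre_bfs grid y x) := by
  unfold Pre_bfs; infer_instance
def pvWitness_bfs : List (List Int) × Int × Int := ([[1, 0], [0, 1]], 0, 0)

def Spec_bfs (grid : List (List Int)) (y : Int) (x : Int) (out : Int) : Prop := out = bfs_alt grid y x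
instance (grid : List (List Int)) (y : Int) (x : Int) (out : Int) : Decidable (Spec_bfs grid y x out) := by unfold Spec_bfs; infer_instance

-- ===== CLAIM (what is proved, stated in full; the proofs are below) =====
def Claim_equal_bfs : Prop := ∀ (grid : List (List Int)) (y : Int) (x : Int), Dom_bfs grid y x → Pre_bfs grid y x → Spec_bfs grid y x (bfs grid y x)

-- ===== LEMMAS AND PROOFS =====

-- in-bounds cells, exactly the bound checks both Pythons perform
def pvInB (grid : List (List Int)) (c : Int × Int) : Prop :=
  0 ≤ c.1 ∧ c.1 < (grid.length : Int) ∧ 0 ≤ c.2 ∧ c.2 < ((grid.headD []).length : Int)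

-- one admissible step of the search
def pvEdge (grid : List (List Int)) (c d : Int × Int) : Prop :=
  (d = (c.1 - 1, c.2) ∨ d = (c.1, c.2 + 1) ∨ d = (c.1 + 1, c.2) ∨ d = (c.1, c.2 - 1)) ∧
  pvInB grid d ∧ ∃ v, bfsGet grid c.1 c.2 = some v ∧ bfsGet grid d.1 d.2 = some (v - 1)

-- paths avoiding the set A (every cell on the path, endpoints included, lies outside A)
inductive pvR (grid : List (List Int)) (A : Set (Int × Int)) : (Int × Int) → (Int × Int) → Prop
  | base (c : Int × Int) : c ∉ A → pvR grid A c c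
  | step {c d e : Int × Int} : pvR grid A c d → pvEdge grid d e → e ∉ A → pvR grid A c e

-- cells reachable from some start in P, avoiding A
def pvS (grid : List (List Int)) (A : Set (Int × Int)) (P : List (Int × Int)) : Set (Int × Int) :=
  {d | ∃ p ∈ P, pvR grid A p d}

-- the number of height-0 cells among them
noncomputable def pvZ (grid : List (List Int)) (A : Set (Int × Int)) (P : List (Int × Int)) : Int :=
  ((pvS grid A P ∩ {d | bfsGet grid d.1 d.2 = some 0}).ncard : Int)

-- the list of neighbours both loops actually step into
def pvNbrs (grid : List (List Int)) (c : Int × Int) (v : Int) : List (Int × Int) :=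
  (([(-1, 0), (0, 1), (1, 0), (0, -1)] : List (Int × Int)).filter
    (fun d => decide (0 ≤ c.1 + d.1 ∧ c.1 + d.1 < (grid.length : Int) ∧
               0 ≤ c.2 + d.2 ∧ c.2 + d.2 < ((grid.headD []).length : Int) ∧
               bfsGet grid (c.1 + d.1) (c.2 + d.2) = some (v - 1)))).map
    (fun d => (c.1 + d.1, c.2 + d.2))

theorem mem_pvS {grid A P} {d : Int × Int} : d ∈ pvS grid A P ↔ ∃ p ∈ P, pvR grid A p d :=
  Iff.rfl

theorem pvR_start_not_mem {grid A} {p d : Int × Int} (h : pvR grid A p d) : p ∉ A := by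
  induction h with
  | base hc => exact hc
  | step _ _ _ ih => exact ih

theorem pvR_end_not_mem {grid A} {p d : Int × Int} (h : pvR grid A p d) : d ∉ A := by
  cases h with
  | base hc => exact hc
  | step _ _ he => exact he

theorem pvR_mono {grid : List (List Int)} {A B : Set (Int × Int)} (hAB : A ⊆ B) {p d : Int × Int}
    (h : pvR grid B p d) : pvR grid A p d := by
  induction h with
  | base hc => exact pvR.base _ (fun hx => hc (hAB hx))
  | step _ he hne ih => exact pvR.step ih he (fun hx => hne (hAB hx))

theorem pvR_trans {grid A} {c n d : Int × Int} (h1 : pvR grid A c n) (h2 : pvR grid A n d) :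
    pvR grid A c d := by
  induction h2 with
  | base _ => exact h1
  | step _ he hne ih => exact pvR.step ih he hne

theorem pvR_inB {grid A} {p d : Int × Int} (h : pvR grid A p d) : d = p ∨ pvInB grid d := by
  induction h with
  | base hc => exact Or.inl rfl
  | step _ he _ _ => exact Or.inr he.2.1

theorem pvInB_subset (grid : List (List Int)) :
    {c | pvInB grid c} ⊆
      ↑(((Finset.range grid.length) ×ˢ (Finset.range (grid.headD []).length)).image
        (fun p : Nat × Nat => ((p.1 : Int), (p.2 : Int)))) := by
  rintro ⟨cy, cx⟩ ⟨h1, h2, h3, h4⟩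
  simp only [Finset.coe_image, Set.mem_image, Finset.mem_coe, Finset.mem_product,
    Finset.mem_range]
  refine ⟨(cy.toNat, cx.toNat), ⟨by omega, by omega⟩, ?_⟩
  simp only [Prod.ext_iff]
  constructor <;> simp <;> omega

theorem pvInB_finite (grid : List (List Int)) : {c | pvInB grid c}.Finite :=
  Set.Finite.subset (Finset.finite_toSet _) (pvInB_subset grid)

theorem pvInB_ncard (grid : List (List Int)) :
    {c | pvInB grid c}.ncard ≤ grid.length * (grid.headD []).length := by
  have h := Set.ncard_le_ncard (pvInB_subset grid) (Finset.finite_toSet _)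
  rw [Set.ncard_coe_finset] at h
  refine le_trans h (le_trans (Finset.card_image_le) ?_)
  simp [Finset.card_product]

theorem pvS_finite {grid A P} : (pvS grid A P).Finite := by
  refine Set.Finite.subset ((List.finite_toSet P).union (pvInB_finite grid)) ?_
  rintro d ⟨p, hp, hr⟩
  rcases pvR_inB hr with rfl | hin
  · exact Or.inl hp
  · exact Or.inr hin

theorem pvS_nil {grid A} : pvS grid A [] = ∅ := by
  simp [pvS]

theorem pvZ_nil {grid A} : pvZ grid A [] = 0 := by
  simp [pvZ, pvS_nil]

theorem pvS_cons_mem {grid A} {c : Int × Int} {P} (hc : c ∈ A) :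
    pvS grid A (c :: P) = pvS grid A P := by
  ext d
  rw [mem_pvS, mem_pvS]
  constructor
  · rintro ⟨p, hp, hr⟩
    rcases List.mem_cons.1 hp with rfl | hp'
    · exact absurd hc (pvR_start_not_mem hr)
    · exact ⟨p, hp', hr⟩
  · rintro ⟨p, hp, hr⟩
    exact ⟨p, List.mem_cons_of_mem _ hp, hr⟩

theorem pvZ_cons_mem {grid A} {c : Int × Int} {P} (hc : c ∈ A) :
    pvZ grid A (c :: P) = pvZ grid A P := by
  simp [pvZ, pvS_cons_mem hc]

theorem pvS_congr {grid A} {P Q : List (Int × Int)} (h : ∀ p, p ∈ P ↔ p ∈ Q) :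
    pvS grid A P = pvS grid A Q := by
  ext d
  rw [mem_pvS, mem_pvS]
  constructor <;> rintro ⟨p, hp, hr⟩
  · exact ⟨p, (h p).1 hp, hr⟩
  · exact ⟨p, (h p).2 hp, hr⟩

theorem pvZ_congr {grid A} {P Q : List (Int × Int)} (h : ∀ p, p ∈ P ↔ p ∈ Q) :
    pvZ grid A P = pvZ grid A Q := by
  simp [pvZ, pvS_congr h]

-- splitting a path from p at its last visit of c
theorem pvR_avoid_insert {grid A} {c p d : Int × Int} (h : pvR grid A p d) :
    d = c ∨ (∃ n, pvEdge grid c n ∧ pvR grid (insert c A) n d) ∨ pvR grid (insert c A) p d := by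
  induction h with
  | base hq =>
    by_cases hqc : p = c
    · exact Or.inl hqc
    · exact Or.inr (Or.inr (pvR.base p (by simp [Set.mem_insert_iff, hqc, hq])))
  | step hpd he hne ih =>
    rename_i dd ee
    by_cases hec : ee = c
    · exact Or.inl hec
    · have he' : ee ∉ insert c A := by simp [Set.mem_insert_iff, hec, hne]
      rcases ih with h1 | ⟨n, hn, hnd⟩ | h2
      · exact Or.inr (Or.inl ⟨ee, h1 ▸ he, pvR.base ee he'⟩)
      · exact Or.inr (Or.inl ⟨n, hn, pvR.step hnd he he'⟩)
      · exact Or.inr (Or.inr (pvR.step h2 he he'))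

theorem pvS_cons_not_mem {grid A} {c : Int × Int} {P L : List (Int × Int)} (hc : c ∉ A)
    (hL : ∀ z, z ∈ L ↔ pvEdge grid c z) :
    pvS grid A (c :: P) = insert c (pvS grid (insert c A) (L ++ P)) := by
  ext d
  rw [Set.mem_insert_iff, mem_pvS, mem_pvS]
  constructor
  · rintro ⟨q, hq, hr⟩
    rcases pvR_avoid_insert (c := c) hr with h1 | ⟨n, hn, hnd⟩ | h2
    · exact Or.inl h1
    · exact Or.inr ⟨n, List.mem_append.2 (Or.inl ((hL n).2 hn)), hnd⟩
    · rcases List.mem_cons.1 hq with rfl | hq'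
      · exact absurd (Set.mem_insert _ _) (pvR_start_not_mem h2)
      · exact Or.inr ⟨q, List.mem_append.2 (Or.inr hq'), h2⟩
  · rintro (rfl | ⟨q, hq, hr⟩)
    · exact ⟨d, List.mem_cons_self, pvR.base d hc⟩
    · rcases List.mem_append.1 hq with hqL | hqP
      · have hq' : pvEdge grid c q := (hL q).1 hqL
        have hqA : q ∉ A := fun hx => pvR_start_not_mem hr (Set.mem_insert_iff.2 (Or.inr hx))
        exact ⟨c, List.mem_cons_self,
          pvR_trans (pvR.step (pvR.base c hc) hq' hqA) (pvR_mono (Set.subset_insert c A) hr)⟩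
      · exact ⟨q, List.mem_cons_of_mem _ hqP, pvR_mono (Set.subset_insert c A) hr⟩

theorem pvZ_cons_not_mem {grid A} {c : Int × Int} {P L : List (Int × Int)} {v : Int}
    (hc : c ∉ A) (hv : bfsGet grid c.1 c.2 = some v)
    (hL : ∀ z, z ∈ L ↔ pvEdge grid c z) :
    pvZ grid A (c :: P) = (if v == 0 then 1 else 0) + pvZ grid (insert c A) (L ++ P) := by
  have hfin : (pvS grid (insert c A) (L ++ P)).Finite := pvS_finite
  have hcnot : c ∉ pvS grid (insert c A) (L ++ P) := by
    intro h
    obtain ⟨p, hp, hr⟩ := mem_pvS.1 h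
    exact pvR_end_not_mem hr (Set.mem_insert c A)
  unfold pvZ
  rw [pvS_cons_not_mem hc hL]
  by_cases hv0 : v = 0
  · have hcz : c ∈ {d : Int × Int | bfsGet grid d.1 d.2 = some 0} := by
      simp only [Set.mem_setOf_eq, hv, hv0]
    rw [Set.insert_inter_of_mem hcz,
      Set.ncard_insert_of_notMem (fun h => hcnot h.1) (hfin.inter_of_left _)]
    simp only [hv0, beq_self_eq_true, if_true]
    push_cast
    ring
  · have hcz : c ∉ {d : Int × Int | bfsGet grid d.1 d.2 = some 0} := by
      simp [Set.mem_setOf_eq, hv, hv0]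
    rw [Set.insert_inter_of_notMem hcz]
    simp [hv0]

theorem pvInB_get {grid : List (List Int)}
    (Hrows : ∀ row ∈ grid, (grid.headD []).length ≤ row.length) {d : Int × Int}
    (h : pvInB grid d) : ∃ v, bfsGet grid d.1 d.2 = some v := by
  obtain ⟨h1, h2, h3, h4⟩ := h
  have hlt : d.1.toNat < grid.length := by omega
  have hy : PySem.List.pyGet? grid d.1 = some (grid[d.1.toNat]) := by
    rw [PySem.List.pyGet?_of_nonneg grid h1, List.getElem?_eq_getElem hlt]
  have hrow : grid[d.1.toNat] ∈ grid := List.getElem_mem _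
  have hW := Hrows _ hrow
  have hlt2 : d.2.toNat < grid[d.1.toNat].length := by omega
  have hx : PySem.List.pyGet? (grid[d.1.toNat]) d.2 = some (grid[d.1.toNat][d.2.toNat]) := by
    rw [PySem.List.pyGet?_of_nonneg _ h3, List.getElem?_eq_getElem hlt2]
  refine ⟨grid[d.1.toNat][d.2.toNat], ?_⟩
  unfold bfsGet
  rw [hy]
  simpa using hx

theorem pvNbrs_mem {grid : List (List Int)} {c : Int × Int} {v : Int}
    (hv : bfsGet grid c.1 c.2 = some v) (z : Int × Int) :
    z ∈ pvNbrs grid c v ↔ pvEdge grid c z := by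
  have e1 : c.1 + (-1 : Int) = c.1 - 1 := by ring
  have e4 : c.2 + (-1 : Int) = c.2 - 1 := by ring
  have e0a : c.1 + (0 : Int) = c.1 := by ring
  have e0b : c.2 + (0 : Int) = c.2 := by ring
  unfold pvNbrs pvEdge pvInB
  simp only [List.mem_map, List.mem_filter, decide_eq_true_eq, List.mem_cons,
    List.not_mem_nil, or_false]
  constructor
  · rintro ⟨d, ⟨hd, hb1, hb2, hb3, hb4, hg⟩, rfl⟩
    refine ⟨?_, ⟨hb1, hb2, hb3, hb4⟩, v, hv, hg⟩
    rcases hd with rfl | rfl | rfl | rfl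
    · left; simp only [Prod.mk.injEq]; refine ⟨?_, ?_⟩ <;> (try dsimp only) <;> omega
    · right; left; simp only [Prod.mk.injEq]; refine ⟨?_, ?_⟩ <;> (try dsimp only) <;> omega
    · right; right; left; simp only [Prod.mk.injEq]; refine ⟨?_, ?_⟩ <;> (try dsimp only) <;> omega
    · right; right; right; simp only [Prod.mk.injEq]; refine ⟨?_, ?_⟩ <;> (try dsimp only) <;> omega
  · rintro ⟨hdisj, hb, w, hw, hwd⟩
    rw [hv] at hw
    have hwv : w = v := (Option.some.inj hw).symm
    subst hwv
    obtain ⟨hb1, hb2, hb3, hb4⟩ := hb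
    rcases hdisj with rfl | rfl | rfl | rfl <;>
      dsimp only at hb1 hb2 hb3 hb4 hwd
    · refine ⟨(-1, 0), ⟨by simp, ?_, ?_, ?_, ?_, ?_⟩, ?_⟩
      · dsimp only; omega
      · dsimp only; omega
      · dsimp only; omega
      · dsimp only; omega
      · dsimp only; rw [e1, e0b]; exact hwd
      · dsimp only; rw [e1, e0b]
    · refine ⟨(0, 1), ⟨by simp, ?_, ?_, ?_, ?_, ?_⟩, ?_⟩
      · dsimp only; omega
      · dsimp only; omega
      · dsimp only; omega
      · dsimp only; omega
      · dsimp only; rw [e0a]; exact hwd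
      · dsimp only; rw [e0a]
    · refine ⟨(1, 0), ⟨by simp, ?_, ?_, ?_, ?_, ?_⟩, ?_⟩
      · dsimp only; omega
      · dsimp only; omega
      · dsimp only; omega
      · dsimp only; omega
      · dsimp only; rw [e0b]; exact hwd
      · dsimp only; rw [e0b]
    · refine ⟨(0, -1), ⟨by simp, ?_, ?_, ?_, ?_, ?_⟩, ?_⟩
      · dsimp only; omega
      · dsimp only; omega
      · dsimp only; omega
      · dsimp only; omega
      · dsimp only; rw [e4, e0a]; exact hwd
      · dsimp only; rw [e4, e0a]

theorem pvNbrs_length (grid : List (List Int)) (c : Int × Int) (v : Int) :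
    (pvNbrs grid c v).length ≤ 4 := by
  unfold pvNbrs
  rw [List.length_map]
  exact le_trans (List.length_filter_le _ _) (by simp)

-- the neighbour fold of port A is pvNbrs
theorem foldA_nbrs (grid : List (List Int)) (c : Int × Int) (v : Int) :
    ([(-1, 0), (0, 1), (1, 0), (0, -1)] : List (Int × Int)).foldl
      (fun acc d =>
        if 0 ≤ c.1 + d.1 ∧ c.1 + d.1 < (grid.length : Int) ∧
           0 ≤ c.2 + d.2 ∧ c.2 + d.2 < ((grid.headD []).length : Int) ∧
           bfsGet grid (c.1 + d.1) (c.2 + d.2) = some (v - 1)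
        then acc ++ [(c.1 + d.1, c.2 + d.2)] else acc) [] = pvNbrs grid c v := by
  rw [PySem.List.foldl_append_ite]
  simp [pvNbrs]

theorem seen_add_set {seen : PySem.Set (Int × Int)} {c : Int × Int} :
    {z | z ∈ PySem.Set.add seen c} = insert c {z | z ∈ seen} := by
  ext z
  simp only [Set.mem_setOf_eq, PySem.Set.mem_add, Set.mem_insert_iff]
  tauto

-- one-step unfoldings of port A's loop
theorem bfsLoop_cons_mem (grid : List (List Int)) (f : Nat) (c : Int × Int)
    (rest : List (Int × Int)) (seen : PySem.Set (Int × Int)) (res : Int) (h : c ∈ seen) :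
    bfsLoop grid (f + 1) (c :: rest) seen res = bfsLoop grid f rest seen res := by
  have hct : PySem.Set.contains seen c = true := (PySem.Set.contains_iff seen c).2 h
  conv_lhs => unfold bfsLoop
  rw [if_pos hct]

theorem bfsLoop_cons_not_mem (grid : List (List Int)) (f : Nat) (c : Int × Int)
    (rest : List (Int × Int)) (seen : PySem.Set (Int × Int)) (res : Int) (v : Int)
    (h : c ∉ seen) (hv : bfsGet grid c.1 c.2 = some v) :
    bfsLoop grid (f + 1) (c :: rest) seen res =
      bfsLoop grid f (rest ++ pvNbrs grid c v) (PySem.Set.add seen c)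
        (if v == 0 then res + 1 else res) := by
  have hct : ¬ (PySem.Set.contains seen c = true) :=
    fun hh => h ((PySem.Set.contains_iff seen c).1 hh)
  rw [← foldA_nbrs grid c v]
  conv_lhs => unfold bfsLoop
  rw [if_neg hct]
  simp only [hv]

-- ===== main loop lemma for port A =====
theorem bfsLoop_eq (grid : List (List Int))
    (Hrows : ∀ row ∈ grid, (grid.headD []).length ≤ row.length) :
    ∀ (f : Nat) (stack : List (Int × Int)) (seen : PySem.Set (Int × Int)) (res : Int),
    (∀ c ∈ stack, bfsGet grid c.1 c.2 ≠ none) →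
    5 * (({c | pvInB grid c} ∪ {z | z ∈ stack}) \ {z | z ∈ seen}).ncard + stack.length ≤ f →
    bfsLoop grid f stack seen res = res + pvZ grid {z | z ∈ seen} stack := by
  intro f
  induction f with
  | zero =>
    intro stack seen res hst hfuel
    cases stack with
    | nil => simp [bfsLoop, pvZ_nil]
    | cons c rest =>
      exfalso
      simp only [List.length_cons] at hfuel
      omega
  | succ f ih =>
    intro stack seen res hst hfuel
    cases stack with
    | nil => simp [bfsLoop, pvZ_nil]
    | cons c rest =>
      have hfin_big : ((({c' | pvInB grid c'} ∪ {z | z ∈ c :: rest}) \ {z | z ∈ seen})).Finite :=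
        (((pvInB_finite grid).union (List.finite_toSet _)).diff)
      by_cases hcm : c ∈ seen
      · rw [bfsLoop_cons_mem grid f c rest seen res hcm]
        rw [ih rest seen res (fun d hd => hst d (List.mem_cons_of_mem _ hd)) ?_]
        · rw [pvZ_cons_mem (show c ∈ {z | z ∈ seen} from hcm)]
        · have hsub : ({c' | pvInB grid c'} ∪ {z | z ∈ rest}) \ {z | z ∈ seen} ⊆
              ({c' | pvInB grid c'} ∪ {z | z ∈ c :: rest}) \ {z | z ∈ seen} := by
            rintro w ⟨hw1, hw2⟩
            refine ⟨?_, hw2⟩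
            rcases hw1 with h | h
            · exact Or.inl h
            · exact Or.inr (List.mem_cons_of_mem _ h)
          have hle := Set.ncard_le_ncard hsub hfin_big
          simp only [List.length_cons] at hfuel
          omega
      · obtain ⟨v, hv⟩ := Option.ne_none_iff_exists'.1 (hst c List.mem_cons_self)
        rw [bfsLoop_cons_not_mem grid f c rest seen res v hcm hv]
        have hnb : ∀ z, z ∈ pvNbrs grid c v ↔ pvEdge grid c z := pvNbrs_mem hv
        have hstack' : ∀ d ∈ rest ++ pvNbrs grid c v, bfsGet grid d.1 d.2 ≠ none := by
          intro d hd
          rcases List.mem_append.1 hd with h | h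
          · exact hst d (List.mem_cons_of_mem _ h)
          · obtain ⟨w, hw⟩ := pvInB_get Hrows ((hnb d).1 h).2.1
            simp [hw]
        have hcmem : c ∈ ({c' | pvInB grid c'} ∪ {z | z ∈ c :: rest}) \ {z | z ∈ seen} :=
          ⟨Or.inr List.mem_cons_self, hcm⟩
        rw [ih (rest ++ pvNbrs grid c v) (PySem.Set.add seen c) _ hstack' ?_]
        · rw [seen_add_set,
            pvZ_cons_not_mem (show c ∉ {z | z ∈ seen} from hcm) hv hnb (P := rest),
            pvZ_congr (P := rest ++ pvNbrs grid c v) (Q := pvNbrs grid c v ++ rest)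
              (by intro p; rw [List.mem_append, List.mem_append]; tauto)]
          by_cases hv0 : v = 0 <;> simp [hv0] <;> ring
        · have hsub : ({c' | pvInB grid c'} ∪ {z | z ∈ rest ++ pvNbrs grid c v}) \
              {z | z ∈ PySem.Set.add seen c} ⊆
              (({c' | pvInB grid c'} ∪ {z | z ∈ c :: rest}) \ {z | z ∈ seen}) \ {c} := by
            rintro w ⟨hw1, hw2⟩
            have hw2' : ¬ (w ∈ seen ∨ w = c) := by
              simpa [PySem.Set.mem_add] using hw2
            refine ⟨⟨?_, fun hws => hw2' (Or.inl hws)⟩, fun hwc => hw2' (Or.inr hwc)⟩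
            rcases hw1 with h | h
            · exact Or.inl h
            · rcases List.mem_append.1 h with h' | h'
              · exact Or.inr (List.mem_cons_of_mem _ h')
              · exact Or.inl ((hnb w).1 h').2.1
          have hle := Set.ncard_le_ncard hsub hfin_big.diff
          have hdel := Set.ncard_diff_singleton_of_mem hcmem
          have hpos := (Set.ncard_pos hfin_big).2 ⟨c, hcmem⟩
          have hlen := pvNbrs_length grid c v
          simp only [List.length_append, List.length_cons] at hfuel ⊢
          omega

-- ===== B-side lemmas: the graded (level-by-level) structure of the search =====

-- splitting off the FIRST step of an unconstrained path
theorem pvR_first {grid : List (List Int)} {p d : Int × Int}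
    (h : pvR grid ∅ p d) : d = p ∨ ∃ n, pvEdge grid p n ∧ pvR grid ∅ n d := by
  induction h with
  | base _ => exact Or.inl rfl
  | step hpd he hne ih =>
    rename_i dd ee
    rcases ih with rfl | ⟨n, hn, hnd⟩
    · exact Or.inr ⟨ee, he, pvR.base ee (Set.notMem_empty ee)⟩
    · exact Or.inr ⟨n, hn, pvR.step hnd he hne⟩

-- heights never increase along a path
theorem pvR_value {grid : List (List Int)} {p d : Int × Int}
    (h : pvR grid ∅ p d) : ∀ w, bfsGet grid p.1 p.2 = some w →
    ∃ u, bfsGet grid d.1 d.2 = some u ∧ u ≤ w := by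
  induction h with
  | base _ => exact fun w hw => ⟨w, hw, le_refl w⟩
  | step hpd he hne ih =>
    intro w hw
    obtain ⟨u, hu, hle⟩ := ih w hw
    obtain ⟨_, _, v', hv'1, hv'2⟩ := he
    rw [hu] at hv'1
    have huv : u = v' := Option.some.inj hv'1
    exact ⟨v' - 1, hv'2, by omega⟩

-- one level of the search: reachable-from-F = F itself plus reachable-from-successors
theorem pvS_frontier_split {grid : List (List Int)} {F N : List (Int × Int)}
    (hN : ∀ z, z ∈ N ↔ ∃ c ∈ F, pvEdge grid c z) :
    pvS grid ∅ F = {z | z ∈ F} ∪ pvS grid ∅ N := by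
  ext d
  rw [Set.mem_union, mem_pvS, mem_pvS]
  constructor
  · rintro ⟨p, hp, hr⟩
    rcases pvR_first hr with rfl | ⟨n, hn, hnd⟩
    · exact Or.inl hp
    · exact Or.inr ⟨n, (hN n).2 ⟨p, hp, hn⟩, hnd⟩
  · rintro (hd | ⟨n, hn, hr⟩)
    · exact ⟨d, hd, pvR.base d (Set.notMem_empty d)⟩
    · obtain ⟨c, hc, hedge⟩ := (hN n).1 hn
      exact ⟨c, hc,
        pvR_trans (pvR.step (pvR.base c (Set.notMem_empty c)) hedge (Set.notMem_empty n)) hr⟩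

-- grading: cells of a frontier (all at height v) never reappear later
theorem frontier_disjoint {grid : List (List Int)} {F N : List (Int × Int)} {v : Int}
    (hv : ∀ c ∈ F, bfsGet grid c.1 c.2 = some v)
    (hN : ∀ z, z ∈ N ↔ ∃ c ∈ F, pvEdge grid c z) :
    Disjoint {z | z ∈ F} (pvS grid ∅ N) := by
  rw [Set.disjoint_left]
  rintro d hdF ⟨n, hn, hr⟩
  obtain ⟨c, hc, hedge⟩ := (hN n).1 hn
  obtain ⟨_, _, w, hw1, hw2⟩ := hedge
  rw [hv c hc] at hw1
  obtain ⟨u, hu, hle⟩ := pvR_value hr (w - 1) hw2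
  rw [hv d hdF] at hu
  have := Option.some.inj hw1
  have := Option.some.inj hu
  omega

theorem pvZ_frontier_split {grid : List (List Int)} {F N : List (Int × Int)} {v : Int}
    (hv : ∀ c ∈ F, bfsGet grid c.1 c.2 = some v)
    (hN : ∀ z, z ∈ N ↔ ∃ c ∈ F, pvEdge grid c z) :
    pvZ grid ∅ F =
      (({z | z ∈ F} ∩ {d | bfsGet grid d.1 d.2 = some 0}).ncard : Int) + pvZ grid ∅ N := by
  unfold pvZ
  rw [pvS_frontier_split hN, Set.union_inter_distrib_right,
    Set.ncard_union_eq (Set.disjoint_of_subset (Set.inter_subset_left)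
      (Set.inter_subset_left) (frontier_disjoint hv hN))
      ((List.finite_toSet F).inter_of_left _) (pvS_finite.inter_of_left _)]
  push_cast
  ring

-- the zero-counting fold of port B
theorem countFold_eq (grid : List (List Int)) :
    ∀ (L : List (Int × Int)) (res : Int),
    L.foldl (fun acc z => if bfsGet grid z.1 z.2 == some 0 then acc + 1 else acc) res =
      res + (L.countP (fun z => bfsGet grid z.1 z.2 == some 0) : Int) := by
  intro L
  induction L with
  | nil => intro res; simp
  | cons c L' ih =>
    intro res
    rw [List.foldl_cons, ih, List.countP_cons]
    by_cases hc : bfsGet grid c.1 c.2 = some 0 <;> simp [hc] <;> push_cast <;> ring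

-- the count over a duplicate-free frontier is the cardinality of its zero cells
theorem countP_eq_ncard {grid : List (List Int)} {L : List (Int × Int)} (hnd : L.Nodup) :
    (({z | z ∈ L} ∩ {d | bfsGet grid d.1 d.2 = some 0}).ncard : Int) =
      (L.countP (fun z => bfsGet grid z.1 z.2 == some 0) : Int) := by
  have hset : {z | z ∈ L} ∩ {d | bfsGet grid d.1 d.2 = some 0} =
      ↑(L.filter (fun z => bfsGet grid z.1 z.2 == some 0)).toFinset := by
    ext z
    simp [Set.mem_setOf_eq]
  rw [hset, Set.ncard_coe_finset, List.toFinset_card_of_nodup (hnd.filter _),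
    ← List.countP_eq_length_filter]

-- membership in the inner 4-direction fold of levelNext
theorem mem_innerFold {grid : List (List Int)} {c : Int × Int} {v : Int}
    (hv : bfsGet grid c.1 c.2 = some v) (N : PySem.Set (Int × Int)) (z : Int × Int) :
    (z ∈ ([(-1, 0), (0, 1), (1, 0), (0, -1)] : List (Int × Int)).foldl
        (fun N d =>
          if 0 ≤ c.1 + d.1 ∧ c.1 + d.1 < (grid.length : Int) ∧
             0 ≤ c.2 + d.2 ∧ c.2 + d.2 < ((grid.headD []).length : Int) ∧
             bfsGet grid (c.1 + d.1) (c.2 + d.2) = some (v - 1)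
          then PySem.Set.add N (c.1 + d.1, c.2 + d.2) else N) N) ↔
      z ∈ N ∨ pvEdge grid c z := by
  rw [← pvNbrs_mem hv z]
  unfold pvNbrs
  generalize ([(-1, 0), (0, 1), (1, 0), (0, -1)] : List (Int × Int)) = dirs
  induction dirs generalizing N with
  | nil => simp
  | cons d ds ih =>
    rw [List.foldl_cons]
    by_cases hd : 0 ≤ c.1 + d.1 ∧ c.1 + d.1 < (grid.length : Int) ∧
        0 ≤ c.2 + d.2 ∧ c.2 + d.2 < ((grid.headD []).length : Int) ∧
        bfsGet grid (c.1 + d.1) (c.2 + d.2) = some (v - 1)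
    · rw [if_pos hd, ih, PySem.Set.mem_add]
      simp only [List.filter_cons, decide_eq_true_eq, if_pos hd, List.map_cons, List.mem_cons]
      tauto
    · rw [if_neg hd, ih]
      simp only [List.filter_cons, decide_eq_true_eq, if_neg hd]

-- nodup is preserved by the inner fold
theorem nodup_innerFold {grid : List (List Int)} {c : Int × Int} {v : Int}
    (N : PySem.Set (Int × Int)) (hnd : N.Nodup) :
    (([(-1, 0), (0, 1), (1, 0), (0, -1)] : List (Int × Int)).foldl
        (fun N d =>
          if 0 ≤ c.1 + d.1 ∧ c.1 + d.1 < (grid.length : Int) ∧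
             0 ≤ c.2 + d.2 ∧ c.2 + d.2 < ((grid.headD []).length : Int) ∧
             bfsGet grid (c.1 + d.1) (c.2 + d.2) = some (v - 1)
          then PySem.Set.add N (c.1 + d.1, c.2 + d.2) else N) N).Nodup := by
  generalize ([(-1, 0), (0, 1), (1, 0), (0, -1)] : List (Int × Int)) = dirs
  induction dirs generalizing N with
  | nil => exact hnd
  | cons d ds ih =>
    rw [List.foldl_cons]
    split
    · exact ih _ (PySem.Set.nodup_add _ _ hnd)
    · exact ih _ hnd

-- membership in and nodup of levelNext
theorem levelNext_spec {grid : List (List Int)} (F : List (Int × Int))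
    (hget : ∀ c ∈ F, bfsGet grid c.1 c.2 ≠ none) :
    (∀ z, z ∈ levelNext grid F ↔ ∃ c ∈ F, pvEdge grid c z) ∧ (levelNext grid F).Nodup := by
  unfold levelNext
  suffices h : ∀ (N : PySem.Set (Int × Int)), N.Nodup →
      (∀ z, (z ∈ F.foldl (fun N c =>
        match bfsGet grid c.1 c.2 with
        | none => N
        | some v =>
          ([(-1, 0), (0, 1), (1, 0), (0, -1)] : List (Int × Int)).foldl
            (fun N d =>
              if 0 ≤ c.1 + d.1 ∧ c.1 + d.1 < (grid.length : Int) ∧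
                 0 ≤ c.2 + d.2 ∧ c.2 + d.2 < ((grid.headD []).length : Int) ∧
                 bfsGet grid (c.1 + d.1) (c.2 + d.2) = some (v - 1)
              then PySem.Set.add N (c.1 + d.1, c.2 + d.2) else N) N) N) ↔
        z ∈ N ∨ ∃ c ∈ F, pvEdge grid c z) ∧
      (F.foldl (fun N c =>
        match bfsGet grid c.1 c.2 with
        | none => N
        | some v =>
          ([(-1, 0), (0, 1), (1, 0), (0, -1)] : List (Int × Int)).foldl
            (fun N d =>
              if 0 ≤ c.1 + d.1 ∧ c.1 + d.1 < (grid.length : Int) ∧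
                 0 ≤ c.2 + d.2 ∧ c.2 + d.2 < ((grid.headD []).length : Int) ∧
                 bfsGet grid (c.1 + d.1) (c.2 + d.2) = some (v - 1)
              then PySem.Set.add N (c.1 + d.1, c.2 + d.2) else N) N) N).Nodup by
    obtain ⟨h1, h2⟩ := h PySem.Set.empty (List.nodup_nil)
    refine ⟨fun z => ?_, h2⟩
    rw [h1 z]
    simp [PySem.Set.empty]
  induction F with
  | nil => intro N hnd; exact ⟨by simp, hnd⟩
  | cons c F' ihF =>
    intro N hnd
    obtain ⟨v, hv⟩ := Option.ne_none_iff_exists'.1 (hget c List.mem_cons_self)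
    obtain ⟨ih1, ih2⟩ := ihF (fun d hd => hget d (List.mem_cons_of_mem _ hd))
      (([(-1, 0), (0, 1), (1, 0), (0, -1)] : List (Int × Int)).foldl
        (fun N d =>
          if 0 ≤ c.1 + d.1 ∧ c.1 + d.1 < (grid.length : Int) ∧
             0 ≤ c.2 + d.2 ∧ c.2 + d.2 < ((grid.headD []).length : Int) ∧
             bfsGet grid (c.1 + d.1) (c.2 + d.2) = some (v - 1)
          then PySem.Set.add N (c.1 + d.1, c.2 + d.2) else N) N)
      (nodup_innerFold N hnd)
    constructor
    · intro z
      rw [List.foldl_cons]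
      simp only [hv]
      rw [ih1 z, mem_innerFold hv N z]
      simp only [List.mem_cons]
      constructor
      · rintro ((hz | he) | ⟨c', hc', he⟩)
        · exact Or.inl hz
        · exact Or.inr ⟨c, Or.inl rfl, he⟩
        · exact Or.inr ⟨c', Or.inr hc', he⟩
      · rintro (hz | ⟨c', (rfl | hc'), he⟩)
        · exact Or.inl (Or.inl hz)
        · exact Or.inl (Or.inr he)
        · exact Or.inr ⟨c', hc', he⟩
    · rw [List.foldl_cons]
      simp only [hv]
      exact ih2

-- all cells of the next frontier sit one level lower
theorem levelNext_value {grid : List (List Int)} {F : List (Int × Int)} {v : Int}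
    (hv : ∀ c ∈ F, bfsGet grid c.1 c.2 = some v)
    {z : Int × Int} (hz : ∃ c ∈ F, pvEdge grid c z) :
    bfsGet grid z.1 z.2 = some (v - 1) := by
  obtain ⟨c, hc, _, _, w, hw1, hw2⟩ := hz
  rw [hv c hc] at hw1
  rw [hw2, Option.some.inj hw1]

-- ===== main loop lemma for port B =====
theorem levelLoop_eq (grid : List (List Int)) :
    ∀ (f : Nat) (F : PySem.Set (Int × Int)) (res : Int) (v : Int),
    F.Nodup → (∀ c ∈ F, bfsGet grid c.1 c.2 = some v) →
    (pvS grid ∅ F).ncard < f →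
    levelLoop grid f F res = res + pvZ grid ∅ F := by
  intro f
  induction f with
  | zero => intro F res v _ _ hfuel; omega
  | succ f ih =>
    intro F res v hnd hv hfuel
    cases F with
    | nil =>
      rw [show levelLoop grid (f + 1) [] res = res from rfl, pvZ_nil]
      ring
    | cons c F' =>
      have hget : ∀ d ∈ c :: F', bfsGet grid d.1 d.2 ≠ none := by
        intro d hd
        rw [hv d hd]
        simp
      obtain ⟨hNmem, hNnd⟩ := levelNext_spec (grid := grid) (c :: F') hget
      have hNval : ∀ z ∈ levelNext grid (c :: F'), bfsGet grid z.1 z.2 = some (v - 1) :=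
        fun z hz => levelNext_value hv ((hNmem z).1 hz)
      have hsplitS : pvS grid ∅ (c :: F') =
          {z | z ∈ (c :: F')} ∪ pvS grid ∅ (levelNext grid (c :: F')) :=
        pvS_frontier_split hNmem
      have hdisj : Disjoint {z | z ∈ (c :: F')} (pvS grid ∅ (levelNext grid (c :: F'))) :=
        frontier_disjoint hv hNmem
      have hfuel' : (pvS grid ∅ (levelNext grid (c :: F'))).ncard < f := by
        have hss : pvS grid ∅ (levelNext grid (c :: F')) ⊂ pvS grid ∅ (c :: F') := by
          constructor
          · rw [hsplitS]; exact Set.subset_union_right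
          · intro hsub
            have hcmem : c ∈ pvS grid ∅ (c :: F') :=
              ⟨c, List.mem_cons_self, pvR.base c (Set.notMem_empty c)⟩
            have hcN : c ∈ pvS grid ∅ (levelNext grid (c :: F')) := hsub hcmem
            exact (Set.disjoint_left.1 hdisj) (List.mem_cons_self) hcN
        have := Set.ncard_lt_ncard hss pvS_finite
        omega
      rw [show levelLoop grid (f + 1) (c :: F') res =
          levelLoop grid f (levelNext grid (c :: F'))
            ((c :: F').foldl
              (fun acc z => if bfsGet grid z.1 z.2 == some 0 then acc + 1 else acc) res) from rfl,
        ih _ _ (v - 1) hNnd hNval hfuel', countFold_eq grid,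
        pvZ_frontier_split hv hNmem, countP_eq_ncard hnd]
      ring

-- ===== VERDICT (by name: the statement is the Claim_ definition above) =====
theorem bfs_spec : Claim_equal_bfs := by
  intro grid y x _ hpre
  obtain ⟨hget, Hrows⟩ := hpre
  show bfs grid y x = bfs_alt grid y x
  have h4 := pvInB_ncard grid
  obtain ⟨v0, hv0⟩ := Option.ne_none_iff_exists'.1 hget
  have hsub1 : pvS grid ∅ [(y, x)] ⊆ insert (y, x) {c | pvInB grid c} := by
    rintro d ⟨p, hp, hr⟩
    have hp' : p = (y, x) := by simpa using hp
    subst hp'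
    rcases pvR_inB hr with rfl | hin
    · exact Set.mem_insert _ _
    · exact Set.mem_insert_of_mem _ hin
  have hA := bfsLoop_eq grid Hrows (5 * (grid.length * (grid.headD []).length + 1) + 1)
    [(y, x)] PySem.Set.empty 0
    (by
      intro d hd
      have hd' : d = (y, x) := by simpa using hd
      subst hd'
      exact hget)
    (by
      have h1 : ({c | pvInB grid c} ∪ {z | z ∈ [(y, x)]}) \
          {z | z ∈ (PySem.Set.empty : PySem.Set (Int × Int))} ⊆
          insert (y, x) {c | pvInB grid c} := by
        rintro w ⟨hw1, _⟩
        rcases hw1 with h | h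
        · exact Set.mem_insert_of_mem _ h
        · have hw : w = (y, x) := by simpa using h
          exact hw ▸ Set.mem_insert _ _
      have h2 := Set.ncard_le_ncard h1 ((pvInB_finite grid).insert _)
      have h3 := Set.ncard_insert_le (y, x) {c | pvInB grid c}
      simp only [List.length_cons, List.length_nil]
      omega)
  have hB := levelLoop_eq grid (grid.length * (grid.headD []).length + 2)
    (PySem.Set.ofList [(y, x)]) 0 v0
    (PySem.Set.nodup_ofList _)
    (by
      intro c hc
      have hc' : c = (y, x) := by
        have := (PySem.Set.mem_ofList _ _).1 hc
        simpa using this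
      subst hc'
      exact hv0)
    (by
      have hofl : (PySem.Set.ofList [(y, x)] : PySem.Set (Int × Int)) = [(y, x)] := rfl
      rw [hofl]
      have h2 := Set.ncard_le_ncard hsub1 ((pvInB_finite grid).insert _)
      have h3 := Set.ncard_insert_le (y, x) {c | pvInB grid c}
      omega)
  have hofl : (PySem.Set.ofList [(y, x)] : PySem.Set (Int × Int)) = [(y, x)] := rfl
  unfold bfs bfs_alt
  rw [hA, hB, hofl]
  have hempty : {z | z ∈ (PySem.Set.empty : PySem.Set (Int × Int))} = (∅ : Set (Int × Int)) := by
    ext z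
    simp [PySem.Set.empty]
  rw [hempty]
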